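-- pv_equiv track=rewrite | github.com/nilande/aoc2021 | day 23/day 23.py | state_from_string
-- ===== SOURCE A (Python) =====
-- def state_from_string(input_string: str) -> int:
--     result = 0
--     for c in input_string:
--         match c:
--             case '.': result <<= 3
--             case 'A': result = (result << 3) + 1
--             case 'B': result = (result << 3) + 2
--             case 'C': result = (result << 3) + 3
--             case 'D': result = (result << 3) + 4
--     return result
-- ===== SOURCE B (Python) =====
-- _DIGIT = {'.': '0', 'A': '1', 'B': '2', 'C': '3', 'D': '4'}
--
-- def state_from_string(input_string: str) -> int:
--     digits = ''.join(_DIGIT[c] for c in input_string if c in _DIGIT)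
--     return int(digits, 8) if digits else 0
-- ===== Notes on version B (the rewrite author's own statement) =====
-- stated objective: idiomatic
-- what changed: Replaces the explicit shift-and-add accumulator loop with a build-then-parse approach: map the five relevant characters to octal digits, drop everything else, and parse the resulting digit string in base 8 with int(digits, 8).
import Mathlib
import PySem

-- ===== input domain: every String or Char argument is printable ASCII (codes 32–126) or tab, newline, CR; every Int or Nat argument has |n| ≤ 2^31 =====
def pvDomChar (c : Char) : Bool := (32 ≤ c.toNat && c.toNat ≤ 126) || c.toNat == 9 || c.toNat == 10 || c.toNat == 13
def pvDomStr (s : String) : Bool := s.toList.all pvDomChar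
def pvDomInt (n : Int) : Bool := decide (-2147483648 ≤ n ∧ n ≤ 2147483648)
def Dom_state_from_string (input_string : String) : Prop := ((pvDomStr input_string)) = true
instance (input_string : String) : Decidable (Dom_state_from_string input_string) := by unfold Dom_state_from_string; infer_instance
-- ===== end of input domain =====

-- B replaces A's shift-and-add accumulator loop with map-to-octal-digits then base-8 parse (idiomatic; same cost).


-- ===== PORT A =====
-- one step of A's match; Python's 'r << 3' on an int equals r * 8 exactly (also for negatives)
def sfsStepA (r : Int) (c : Char) : Int :=
  if c = '.' then r * 8
  else if c = 'A' then r * 8 + 1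
  else if c = 'B' then r * 8 + 2
  else if c = 'C' then r * 8 + 3
  else if c = 'D' then r * 8 + 4
  else r

def state_from_string (input_string : String) : Int :=
  input_string.toList.foldl sfsStepA 0

-- ===== PORT B =====
-- B's _DIGIT table: octal digit for the five relevant characters, none otherwise
def sfsDigit? (c : Char) : Option Char :=
  if c = '.' then some '0'
  else if c = 'A' then some '1'
  else if c = 'B' then some '2'
  else if c = 'C' then some '3'
  else if c = 'D' then some '4'
  else none

-- int(digits, 8): exact for the '0'..'4' digit strings B builds; empty ↦ 0 (the 'else 0' branch)
def state_from_string_alt (input_string : String) : Int :=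
  let digits := input_string.toList.filterMap sfsDigit?
  digits.foldl (fun acc d => acc * 8 + ((d.toNat : Int) - 48)) 0

-- ===== PRECONDITION & SPEC =====
def Spec_state_from_string (input_string : String) (out : Int) : Prop := out = state_from_string_alt input_string
instance (input_string : String) (out : Int) : Decidable (Spec_state_from_string input_string out) := by unfold Spec_state_from_string; infer_instance

-- ===== CLAIM (what is proved, stated in full; the proofs are below) =====
def Claim_equal_state_from_string : Prop := ∀ (input_string : String), Dom_state_from_string input_string → Spec_state_from_string input_string (state_from_string input_string)

-- ===== LEMMAS AND PROOFS =====
theorem sfsStep_eq (r : Int) (c : Char) :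
    sfsStepA r c = (match sfsDigit? c with
      | some d => r * 8 + ((d.toNat : Int) - 48)
      | none => r) := by
  unfold sfsStepA sfsDigit?
  split_ifs <;> simp

theorem sfs_fold_eq (l : List Char) (r : Int) :
    l.foldl sfsStepA r =
      (l.filterMap sfsDigit?).foldl (fun acc d => acc * 8 + ((d.toNat : Int) - 48)) r := by
  induction l generalizing r with
  | nil => rfl
  | cons c t ih =>
    simp only [List.foldl_cons, List.filterMap_cons, sfsStep_eq]
    cases h : sfsDigit? c <;> simp [ih]

-- ===== VERDICT (by name: the statement is the Claim_ definition above) =====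
theorem state_from_string_spec : Claim_equal_state_from_string := by
  intro s _
  unfold Spec_state_from_string state_from_string state_from_string_alt
  exact sfs_fold_eq s.toList 0
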